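-- pv_equiv track=rewrite | github.com/Monti03/Aspect-Based-Sentiment-Analysis | hw2/stud/implementation.py | get_indexes_to_merge
-- ===== SOURCE A (Python) =====
-- from typing import List, Tuple, Dict
--
-- def get_indexes_to_merge(word_pieces:List, start_idx:List):
--
--     word_pieces_to_merge = []
--     started = False
--     tot_to_subtract = 0 # number of word pieces starting with ##
--     for i, word_piece in enumerate(word_pieces):
--         idx = start_idx + i
--         # if the word piece of the term is not the first one
--         # that form that term
--         if (len(word_piece)>2 and word_piece[0:2] == "##"):
--             # if is not the first word piece of the term with ##
--             # than we have only to append the index to the last entry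
--             if (started):
--                 word_pieces_to_merge[-1].append(idx)
--
--             #else: this is the first word piece with ## of the term
--             # so we have to add both the indices idx-1 and idx
--             # since the term has started the word piece before
--             else:
--                 word_pieces_to_merge.append([idx-1, idx])
--             started = True
--             tot_to_subtract += 1
--         else:
--             started = False
--
--     return word_pieces_to_merge, tot_to_subtract
-- ===== SOURCE B (Python) =====
-- def get_indexes_to_merge(word_pieces, start_idx):
--     # run-based scan: find each maximal run of '##'-continuation pieces,
--     # emit its index range (prepended by the preceding index) in one go
--     def is_cont(wp):
--         return len(wp) > 2 and wp[:2] == "##"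
--
--     n = len(word_pieces)
--     groups = []
--     tot_to_subtract = 0
--     i = 0
--     while i < n:
--         if is_cont(word_pieces[i]):
--             j = i
--             while j < n and is_cont(word_pieces[j]):
--                 j += 1
--             groups.append([start_idx + k for k in range(i - 1, j)])
--             tot_to_subtract += j - i
--             i = j
--         else:
--             i += 1
--     return groups, tot_to_subtract
-- ===== Notes on version B (the rewrite author's own statement) =====
-- stated objective: alternative
-- what changed: Replaces the 'started'-flag state machine that appends to the last output list with a run-based scan: each maximal run of '##'-continuation pieces is located with an inner advance and its whole index group is materialized at once.
import Mathlib
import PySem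

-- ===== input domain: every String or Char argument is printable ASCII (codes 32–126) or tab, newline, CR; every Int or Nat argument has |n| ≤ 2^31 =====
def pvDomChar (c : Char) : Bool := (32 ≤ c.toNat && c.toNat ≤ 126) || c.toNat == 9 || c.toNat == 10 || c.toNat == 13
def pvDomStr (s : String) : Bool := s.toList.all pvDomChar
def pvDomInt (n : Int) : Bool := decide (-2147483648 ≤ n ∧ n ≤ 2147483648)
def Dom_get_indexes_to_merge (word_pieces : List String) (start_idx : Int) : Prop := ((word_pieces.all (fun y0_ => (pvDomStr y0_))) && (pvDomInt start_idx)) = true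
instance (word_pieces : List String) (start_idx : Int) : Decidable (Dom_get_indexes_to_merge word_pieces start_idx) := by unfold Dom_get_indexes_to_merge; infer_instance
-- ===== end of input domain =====

-- B replaces A's 'started'-flag state machine with a run-based scan (alternative decomposition, same cost).

-- shared predicate: len(word_piece) > 2 and word_piece[0:2] == "##"  (identical expression in both sources)
def pvIsCont (w : String) : Bool :=
  decide (2 < PySem.Str.len w) && (PySem.Str.slice w (some 0) (some 2) == "##")

-- ===== PORT A =====
-- word_pieces_to_merge[-1].append(idx)  (list is nonempty whenever Python reaches this; [] case unreachable)
def pvAppendLast (xss : List (List Int)) (x : Int) : List (List Int) :=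
  match xss with
  | [] => []
  | [ys] => [ys ++ [x]]
  | ys :: rest => ys :: pvAppendLast rest x

-- the for-loop; idx carries start_idx + i incrementally
def pvLoopA (ws : List String) (idx : Int) (acc : List (List Int)) (started : Bool) (tot : Int) :
    List (List Int) × Int :=
  match ws with
  | [] => (acc, tot)
  | w :: rest =>
    if pvIsCont w then
      pvLoopA rest (idx + 1)
        (if started then pvAppendLast acc idx else acc ++ [[idx - 1, idx]]) true (tot + 1)
    else
      pvLoopA rest (idx + 1) acc false tot

def get_indexes_to_merge (word_pieces : List String) (start_idx : Int) : List (List Int) × Int :=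
  pvLoopA word_pieces start_idx [] false 0

-- ===== PORT B =====
-- outer while: skip non-continuation pieces; on a continuation piece, the inner while
-- advances j to the end of the run (takeWhile length), the whole group is emitted at once
def pvScan (ws : List String) (idx : Int) : List (List Int) × Int :=
  match ws with
  | [] => ([], 0)
  | w :: rest =>
    if pvIsCont w then
      let n := (rest.takeWhile pvIsCont).length
      let p := pvScan (rest.drop n) (idx + (1 + n : Nat))
      (((List.range (1 + n + 1)).map (fun k : Nat => idx - 1 + (k : Int))) :: p.1,
        ((1 + n : Nat) : Int) + p.2)
    else
      pvScan rest (idx + 1)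
termination_by ws.length
decreasing_by
  · simp [Nat.lt_succ_of_le (Nat.sub_le _ _)]
  · simp

def get_indexes_to_merge_alt (word_pieces : List String) (start_idx : Int) : List (List Int) × Int :=
  pvScan word_pieces start_idx

-- ===== PRECONDITION & SPEC =====
def Spec_get_indexes_to_merge (word_pieces : List String) (start_idx : Int) (out : List (List Int) × Int) : Prop := out = get_indexes_to_merge_alt word_pieces start_idx
instance (word_pieces : List String) (start_idx : Int) (out : List (List Int) × Int) : Decidable (Spec_get_indexes_to_merge word_pieces start_idx out) := by unfold Spec_get_indexes_to_merge; infer_instance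

-- ===== CLAIM (what is proved, stated in full; the proofs are below) =====
def Claim_equal_get_indexes_to_merge : Prop := ∀ (word_pieces : List String) (start_idx : Int), Dom_get_indexes_to_merge word_pieces start_idx → Spec_get_indexes_to_merge word_pieces start_idx (get_indexes_to_merge word_pieces start_idx)

-- ===== LEMMAS AND PROOFS =====

theorem pvAppendLast_concat (acc : List (List Int)) (cur : List Int) (x : Int) :
    pvAppendLast (acc ++ [cur]) x = acc ++ [cur ++ [x]] := by
  induction acc with
  | nil => simp [pvAppendLast]
  | cons y ys ih =>
    cases ys with
    | nil => simp [pvAppendLast]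
    | cons z zs => simpa [pvAppendLast] using ih

theorem pvRange_map_succ (n : Nat) (a : Int) :
    (List.range (n + 1)).map (fun k : Nat => a + (k : Int))
      = a :: (List.range n).map (fun k : Nat => (a + 1) + (k : Int)) := by
  rw [List.range_succ_eq_map, List.map_cons, List.map_map]
  congr 1
  · simp
  · apply List.map_congr_left
    intro k _
    simp only [Function.comp_apply]
    push_cast
    ring

-- folding A's loop through a maximal leading run of continuation pieces with started = true
theorem pvLoopA_run (ws : List String) (idx : Int) (acc : List (List Int)) (cur : List Int) (tot : Int) :
    pvLoopA ws idx (acc ++ [cur]) true tot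
      = pvLoopA (ws.drop (ws.takeWhile pvIsCont).length)
          (idx + (ws.takeWhile pvIsCont).length)
          (acc ++ [cur ++ (List.range (ws.takeWhile pvIsCont).length).map (fun k : Nat => idx + (k : Int))])
          true (tot + (ws.takeWhile pvIsCont).length) := by
  induction ws generalizing idx cur tot with
  | nil => simp [pvLoopA]
  | cons w rest ih =>
    by_cases h : pvIsCont w = true
    · rw [pvLoopA]
      simp only [h, if_true, List.takeWhile_cons_of_pos h, pvAppendLast_concat]
      rw [ih (idx + 1) (cur ++ [idx]) (tot + 1)]
      simp only [List.length_cons, List.drop_succ_cons]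
      rw [pvRange_map_succ]
      congr 1
      · push_cast; ring
      · simp
      · push_cast; ring
    · simp [List.takeWhile_cons_of_neg (by simpa using h), pvLoopA, h]

-- once the head fails the predicate (or the list is empty), the started flag is irrelevant
theorem pvLoopA_flag (d : List String) (idx : Int) (acc : List (List Int)) (tot : Int)
    (h : ∀ x xs, d = x :: xs → pvIsCont x = false) :
    pvLoopA d idx acc true tot = pvLoopA d idx acc false tot := by
  cases d with
  | nil => rfl
  | cons x xs => simp [pvLoopA, h x xs rfl]

theorem pvDrop_takeWhile_head (p : String → Bool) (ws : List String) :
    ∀ x xs, ws.drop (ws.takeWhile p).length = x :: xs → p x = false := by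
  induction ws with
  | nil => intro x xs h; simp at h
  | cons w rest ih =>
    intro x xs h
    by_cases hp : p w = true
    · rw [List.takeWhile_cons_of_pos hp] at h
      simpa using ih x xs (by simpa using h)
    · rw [List.takeWhile_cons_of_neg (by simpa using hp)] at h
      simp at h
      rw [← h.1]; simpa using hp

theorem pvLoopA_eq_pvScan (ws : List String) (idx : Int) :
    ∀ (acc : List (List Int)) (tot : Int),
      pvLoopA ws idx acc false tot = (acc ++ (pvScan ws idx).1, tot + (pvScan ws idx).2) := by
  induction ws, idx using pvScan.induct with
  | case1 idx => intro acc tot; simp [pvLoopA, pvScan]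
  | case2 idx w rest h n ih =>
    intro acc tot
    rw [pvLoopA]
    simp only [h, if_true, Bool.false_eq_true, if_false]
    rw [pvLoopA_run rest (idx + 1) acc [idx - 1, idx] (tot + 1)]
    rw [show idx + 1 + ((List.takeWhile pvIsCont rest).length : Int)
          = idx + ((1 + (List.takeWhile pvIsCont rest).length : Nat) : Int) by push_cast; ring]
    rw [pvLoopA_flag _ _ _ _ (fun x xs hx => pvDrop_takeWhile_head pvIsCont rest x xs hx)]
    rw [ih]
    rw [pvScan]
    simp only [h, if_true, Prod.mk.injEq]
    constructor
    · rw [show 1 + (List.takeWhile pvIsCont rest).length + 1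
            = (List.takeWhile pvIsCont rest).length + 1 + 1 from by omega]
      rw [pvRange_map_succ, pvRange_map_succ]
      simp only [List.append_assoc, List.cons_append, List.nil_append]
      congr 1
      congr 1
      congr 1
      congr 1
      · ring
      · apply List.map_congr_left; intro k _; ring
    · push_cast; ring
  | case3 idx w rest h ih =>
    intro acc tot
    rw [pvLoopA]
    simp only [h]
    rw [ih, pvScan]
    simp [h]

-- ===== VERDICT (by name: the statement is the Claim_ definition above) =====
theorem get_indexes_to_merge_spec : Claim_equal_get_indexes_to_merge := by
  intro ws s _
  unfold Spec_get_indexes_to_merge get_indexes_to_merge get_indexes_to_merge_alt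
  simpa using pvLoopA_eq_pvScan ws s [] 0
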